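-- pv_equiv track=rewrite | github.com/Michal0ss/WDI | WDI_algo/Kolosy_poprawkowe/23/4B.py | cutting
-- ===== SOURCE A (Python) =====
-- def cutting(slowo):
--     samogloski = ["a", "e", "i", "o", "u"]
--
--     # tablica pozycji samoglosek w slowo
--     pozycje = []
--     for i in range(len(slowo)):
--         if slowo[i] in samogloski:
--             pozycje.append(i)
--
--     result = 1
--     for i in range(1, len(pozycje)):
--         result *= pozycje[i] - pozycje[i - 1]
--
--     return result
-- ===== SOURCE B (Python) =====
-- def cutting(slowo):
--     vowels = "aeiou"
--     last = None
--     result = 1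
--     for i, ch in enumerate(slowo):
--         if ch in vowels:
--             if last is not None:
--                 result *= i - last
--             last = i
--     return result
-- ===== Notes on version B (the rewrite author's own statement) =====
-- stated objective: simpler
-- what changed: B fuses the two phases into one pass that tracks only the previous vowel index, eliminating the intermediate position table and the index-arithmetic loop over it.
import Mathlib
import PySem

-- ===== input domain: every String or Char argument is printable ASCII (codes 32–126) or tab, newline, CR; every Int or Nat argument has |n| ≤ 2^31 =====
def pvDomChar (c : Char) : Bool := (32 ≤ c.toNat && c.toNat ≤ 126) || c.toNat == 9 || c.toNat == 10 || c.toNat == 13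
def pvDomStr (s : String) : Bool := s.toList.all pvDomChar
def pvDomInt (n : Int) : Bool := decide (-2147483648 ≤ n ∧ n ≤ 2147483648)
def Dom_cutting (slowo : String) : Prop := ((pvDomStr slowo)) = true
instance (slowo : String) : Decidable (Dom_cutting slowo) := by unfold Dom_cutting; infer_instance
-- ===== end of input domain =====

-- B fuses A's two phases into one pass that tracks only the previous vowel index (simpler: no position table).

-- ===== PORT A =====
def samogloski : List Char := ['a', 'e', 'i', 'o', 'u']

def cutting (slowo : String) : Int :=
  let cs := slowo.toList
  let pozycje : List Int :=
    (PySem.List.pyRange 0 (PySem.List.len cs) 1).foldl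
      (fun acc i => if PySem.List.pyGetD cs i ' ' ∈ samogloski then acc ++ [i] else acc) []
  (PySem.List.pyRange 1 (PySem.List.len pozycje) 1).foldl
    (fun result i =>
      result * (PySem.List.pyGetD pozycje i 0 - PySem.List.pyGetD pozycje (i - 1) 0)) 1

-- ===== PORT B =====
def vowelsB : List Char := "aeiou".toList

def stepB (st : Option Int × Int) (p : Int × Char) : Option Int × Int :=
  if p.2 ∈ vowelsB then
    match st.1 with
    | some l => (some p.1, st.2 * (p.1 - l))
    | none => (some p.1, st.2)
  else st

def cutting_alt (slowo : String) : Int :=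
  ((PySem.List.enumerate slowo.toList 0).foldl stepB (none, 1)).2

-- ===== PRECONDITION & SPEC =====
def Spec_cutting (slowo : String) (out : Int) : Prop := out = cutting_alt slowo
instance (slowo : String) (out : Int) : Decidable (Spec_cutting slowo out) := by unfold Spec_cutting; infer_instance

-- ===== CLAIM (what is proved, stated in full; the proofs are below) =====
def Claim_equal_cutting : Prop := ∀ (slowo : String), Dom_cutting slowo → Spec_cutting slowo (cutting slowo)

-- ===== LEMMAS AND PROOFS =====

/-- Positions (as Ints, starting at offset `s`) of the vowels of `cs`. -/
def positions (cs : List Char) (s : Int) : List Int :=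
  match cs with
  | [] => []
  | c :: t => if c ∈ samogloski then s :: positions t (s + 1) else positions t (s + 1)

/-- Product of the gaps between consecutive entries. -/
def gprod : List Int → Int
  | [] => 1
  | [_] => 1
  | x :: y :: t => (y - x) * gprod (y :: t)

theorem vowelsB_eq : vowelsB = samogloski := by decide

theorem posFold (cs : List Char) : ∀ (s : Int) (acc : List Int),
    (PySem.List.enumerate cs s).foldl
      (fun acc p => if p.2 ∈ samogloski then acc ++ [p.1] else acc) acc
      = acc ++ positions cs s := by
  induction cs with
  | nil => intro s acc; simp [PySem.List.enumerate_nil, positions]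
  | cons c t ih =>
    intro s acc
    rw [PySem.List.enumerate_cons]
    by_cases h : c ∈ samogloski <;> simp [List.foldl_cons, h, positions, ih]

theorem gprodLoop (p : List Int) : ∀ (r : Int),
    (List.range (p.length - 1)).foldl
      (fun r k => r * (p.getD (k + 1) 0 - p.getD k 0)) r = r * gprod p := by
  induction p with
  | nil => intro r; simp [gprod]
  | cons x q ih =>
    intro r
    match q with
    | [] => simp [gprod]
    | y :: t =>
      have hlen : (x :: y :: t).length - 1 = t.length + 1 := by simp
      rw [hlen, List.range_succ_eq_map, List.foldl_cons, List.foldl_map]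
      have hf : (fun (r : Int) (k : Nat) =>
          r * ((x :: y :: t).getD (k.succ + 1) 0 - (x :: y :: t).getD k.succ 0))
          = fun (r : Int) (k : Nat) =>
          r * ((y :: t).getD (k + 1) 0 - (y :: t).getD k 0) := by
        funext r k
        simp
      rw [hf]
      have := ih (r := r * (y - x))
      simp only [List.length_cons, Nat.add_sub_cancel] at this ⊢
      simpa [gprod, mul_assoc] using this

theorem Bfold_some (cs : List Char) : ∀ (s l r : Int),
    ((PySem.List.enumerate cs s).foldl stepB (some l, r)).2
      = r * gprod (l :: positions cs s) := by
  induction cs with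
  | nil => intro s l r; simp [PySem.List.enumerate_nil, positions, gprod]
  | cons c t ih =>
    intro s l r
    rw [PySem.List.enumerate_cons]
    by_cases h : c ∈ samogloski
    · have hs : stepB (some l, r) (s, c) = (some s, r * (s - l)) := by
        simp [stepB, vowelsB_eq, h]
      rw [List.foldl_cons, hs, ih]
      simp [positions, h, gprod, mul_assoc]
    · have hs : stepB (some l, r) (s, c) = (some l, r) := by
        simp [stepB, vowelsB_eq, h]
      rw [List.foldl_cons, hs, ih]
      simp [positions, h]

theorem Bfold_none (cs : List Char) : ∀ (s r : Int),
    ((PySem.List.enumerate cs s).foldl stepB (none, r)).2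
      = r * gprod (positions cs s) := by
  induction cs with
  | nil => intro s r; simp [PySem.List.enumerate_nil, positions, gprod]
  | cons c t ih =>
    intro s r
    rw [PySem.List.enumerate_cons]
    by_cases h : c ∈ samogloski
    · have hs : stepB ((none : Option Int), r) (s, c) = (some s, r) := by
        simp [stepB, vowelsB_eq, h]
      rw [List.foldl_cons, hs, Bfold_some]
      simp [positions, h]
    · have hs : stepB ((none : Option Int), r) (s, c) = (none, r) := by
        simp [stepB, vowelsB_eq, h]
      rw [List.foldl_cons, hs, ih]
      simp [positions, h]

theorem cutting_eq_gprod (slowo : String) :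
    cutting slowo = gprod (positions slowo.toList 0) := by
  unfold cutting
  simp only []
  set cs := slowo.toList with hcs
  have h1 : (PySem.List.pyRange 0 (PySem.List.len cs) 1).foldl
      (fun acc i => if PySem.List.pyGetD cs i ' ' ∈ samogloski then acc ++ [i] else acc)
      ([] : List Int) = positions cs 0 := by
    have he := PySem.List.enumerate_eq_map_pyRange (xs := cs) (d := ' ')
    have := posFold cs 0 []
    rw [he, List.foldl_map] at this
    simpa using this
  rw [h1]
  set p := positions cs 0 with hp
  rw [PySem.List.pyRange_one, List.foldl_map]
  have hn : ((PySem.List.len p) - 1).toNat = p.length - 1 := by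
    rw [PySem.List.len_eq]; omega
  rw [hn]
  have hf : (fun (r : Int) (k : Nat) =>
      r * (PySem.List.pyGetD p ((1 : Int) + k) 0 - PySem.List.pyGetD p ((1 : Int) + k - 1) 0))
      = fun (r : Int) (k : Nat) => r * (p.getD (k + 1) 0 - p.getD k 0) := by
    funext r k
    have h1k : (1 : Int) + k = ((k + 1 : Nat) : Int) := by omega
    have h1k' : (1 : Int) + k - 1 = ((k : Nat) : Int) := by omega
    rw [h1k', h1k, PySem.List.pyGetD_natCast, PySem.List.pyGetD_natCast]
  rw [hf, gprodLoop]
  ring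

theorem cutting_alt_eq_gprod (slowo : String) :
    cutting_alt slowo = gprod (positions slowo.toList 0) := by
  unfold cutting_alt
  rw [Bfold_none]
  ring

-- ===== VERDICT (by name: the statement is the Claim_ definition above) =====
theorem cutting_spec : Claim_equal_cutting := by
  intro slowo _
  unfold Spec_cutting
  rw [cutting_eq_gprod, cutting_alt_eq_gprod]
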